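-- pv_equiv track=rewrite | github.com/Siddharth-Gandhi/ds | src/utils.py | full_parse_diffs_split
-- ===== SOURCE A (Python) =====
-- def full_parse_diffs_split(diff):
--    # keep both insertions and deletions to be passed to the model
--     res = []
--     cur = []
--     for line in diff.split('\n'):
--         if not len(line) == 0:
--             if (line.startswith('@@') and line.count('@@') > 1):
--                 if cur:
--                     res.append(cur)
--                 cur = []
--             else:
--                 cur.append(line[1:] if (line.startswith('+') or line.startswith('-')) else line)
--     if cur:
--         res.append(cur)
--     return res
-- ===== SOURCE B (Python) =====
-- def _is_header(l):
--     return l.startswith('@@') and l.count('@@') > 1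
--
-- def _clean(seg):
--     # strip the leading +/- marker, drop genuinely empty lines
--     return [l[1:] if l[0] in '+-' else l for l in seg if l != '']
--
-- def _blocks(lines):
--     # repeatedly locate the first @@-header and cut the list there:
--     # each iteration emits the cleaned segment before the header and continues
--     # after it; no per-line accumulator state is carried across lines.
--     out = []
--     while True:
--         i = next((k for k, l in enumerate(lines) if _is_header(l)), None)
--         if i is None:
--             out.append(_clean(lines))
--             return out
--         out.append(_clean(lines[:i]))
--         lines = lines[i + 1:]
--
-- def full_parse_diffs_split(diff):
--     return [b for b in _blocks(diff.split('\n')) if b]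
-- ===== Notes on version B (the rewrite author's own statement) =====
-- stated objective: alternative
-- what changed: Replaces A's single per-line scan with interleaved accumulator/flush state by a cut-at-header algorithm: repeatedly find the index of the next @@-header, slice the segment before it, clean each segment with a comprehension, and filter empty blocks at the end.
import Mathlib
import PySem

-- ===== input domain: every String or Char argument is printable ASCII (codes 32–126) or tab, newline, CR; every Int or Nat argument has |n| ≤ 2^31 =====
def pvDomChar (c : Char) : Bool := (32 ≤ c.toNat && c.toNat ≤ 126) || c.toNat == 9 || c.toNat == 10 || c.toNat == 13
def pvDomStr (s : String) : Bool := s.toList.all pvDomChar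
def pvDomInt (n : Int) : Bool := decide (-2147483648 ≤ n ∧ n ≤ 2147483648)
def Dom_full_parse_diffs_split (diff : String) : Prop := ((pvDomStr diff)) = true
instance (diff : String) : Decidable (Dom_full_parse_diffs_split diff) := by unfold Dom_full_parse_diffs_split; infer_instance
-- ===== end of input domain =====

-- B replaces A's single stateful per-line scan by a cut-at-header algorithm
-- (find next header index, slice, clean each segment); alternative, not faster.

-- ===== PORT A =====
-- one loop step of A: state = (res, cur)
def pvStepA (st : List (List String) × List String) (line : String) :
    List (List String) × List String :=
  if PySem.Str.len line == 0 then st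
  else if PySem.Str.startswith line "@@" && decide (1 < PySem.Str.count line "@@") then
    (if st.2 ≠ [] then (st.1 ++ [st.2], []) else (st.1, []))
  else
    (st.1, st.2 ++ [if PySem.Str.startswith line "+" || PySem.Str.startswith line "-" then
                      PySem.Str.slice line (some 1) none else line])

def full_parse_diffs_split (diff : String) : List (List String) :=
  let st := ((PySem.Str.split? diff "\n").getD []).foldl pvStepA ([], [])
  if st.2 ≠ [] then st.1 ++ [st.2] else st.1

-- ===== PORT B =====
def pvIsHeader (l : String) : Bool :=
  PySem.Str.startswith l "@@" && decide (1 < PySem.Str.count l "@@")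

-- '[l[1:] if l[0] in '+-' else l for l in seg if l != '']'
def pvClean (g : List String) : List String :=
  (g.filter (fun l => l ≠ "")).map (fun l =>
    if PySem.Str.pyGet? l 0 = some '+' ∨ PySem.Str.pyGet? l 0 = some '-' then
      PySem.Str.slice l (some 1) none else l)

-- Source B's _blocks loop: find the first header index (the 'next(enumerate…)' search
-- = findIdx?), emit the cleaned slice before it, continue after it; the tail-recursive
-- form is the while loop with 'lines = lines[i+1:]'
def pvBlocks (ls : List String) : List (List String) :=
  match h : ls.findIdx? pvIsHeader with
  | none => [pvClean ls]
  | some i => pvClean (ls.take i) :: pvBlocks (ls.drop (i + 1))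
termination_by ls.length
decreasing_by
  have hlt : i < ls.length := List.findIdx?_eq_some_iff_findIdx_eq.mp h |>.1
  simp [List.length_drop]; omega

def full_parse_diffs_split_alt (diff : String) : List (List String) :=
  (pvBlocks ((PySem.Str.split? diff "\n").getD [])).filter (fun b => b ≠ [])

-- ===== PRECONDITION & SPEC =====
def Spec_full_parse_diffs_split (diff : String) (out : List (List String)) : Prop := out = full_parse_diffs_split_alt diff
instance (diff : String) (out : List (List String)) : Decidable (Spec_full_parse_diffs_split diff out) := by unfold Spec_full_parse_diffs_split; infer_instance

-- ===== CLAIM (what is proved, stated in full; the proofs are below) =====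
def Claim_equal_full_parse_diffs_split : Prop := ∀ (diff : String), Dom_full_parse_diffs_split diff → Spec_full_parse_diffs_split diff (full_parse_diffs_split diff)

-- ===== LEMMAS AND PROOFS =====

-- A's finalisation
def pvFin (st : List (List String) × List String) : List (List String) :=
  if st.2 ≠ [] then st.1 ++ [st.2] else st.1

-- apply f to the first block only
def pvMapHead (f : List String → List String) : List (List String) → List (List String)
  | [] => []
  | b :: bs => f b :: bs

lemma pvMapHead_comp (f g : List String → List String) (bs : List (List String)) :
    pvMapHead f (pvMapHead g bs) = pvMapHead (fun b => f (g b)) bs := by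
  cases bs <;> rfl

lemma pvMapHead_id (bs : List (List String)) :
    pvMapHead (fun b => b) bs = bs := by
  cases bs <;> simp [pvMapHead]

-- A's '+/-' test equals B's, point-wise, on a non-empty line
lemma pvMark_eq (l : String) (h : l ≠ "") :
    (PySem.Str.startswith l "+" || PySem.Str.startswith l "-")
    = decide (PySem.Str.pyGet? l 0 = some '+' ∨ PySem.Str.pyGet? l 0 = some '-') := by
  rcases hc : l.toList with _ | ⟨c, cs⟩
  · exact absurd (String.toList_eq_nil_iff.mp hc) h
  · simp [PySem.Str.startswith_eq, PySem.Chars.startswith, hc, List.isPrefixOf]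
    cases hp : (c == '+') <;> cases hm : (c == '-') <;> simp_all [BEq.comm]

-- hence A's cleaned line equals B's cleaned line on a non-empty line
lemma pvClean1_eq (l : String) (h : l ≠ "") :
    (if PySem.Str.startswith l "+" || PySem.Str.startswith l "-" then
       PySem.Str.slice l (some 1) none else l)
    = (if PySem.Str.pyGet? l 0 = some '+' ∨ PySem.Str.pyGet? l 0 = some '-' then
         PySem.Str.slice l (some 1) none else l) := by
  by_cases hp : (PySem.Str.pyGet? l 0 = some '+' ∨ PySem.Str.pyGet? l 0 = some '-')
  · rw [pvMark_eq l h]; simp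
  · rw [pvMark_eq l h]; simp

lemma pvLen_eq_zero_iff (l : String) : (PySem.Str.len l == 0) = true ↔ l = "" := by
  simp [PySem.Str.len_eq]

lemma pvClean_cons (l : String) (g : List String) :
    pvClean (l :: g) = pvClean [l] ++ pvClean g := by
  by_cases h : l = "" <;> simp [pvClean, h]

-- unfolding pvBlocks by the value of the header search
lemma pvBlocks_eq_none (ls : List String) (h : ls.findIdx? pvIsHeader = none) :
    pvBlocks ls = [pvClean ls] := by
  rw [pvBlocks]; split <;> simp_all

lemma pvBlocks_eq_some (ls : List String) (i : Nat) (h : ls.findIdx? pvIsHeader = some i) :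
    pvBlocks ls = pvClean (ls.take i) :: pvBlocks (ls.drop (i + 1)) := by
  rw [pvBlocks]; split <;> simp_all

-- peeling a non-header line off the front of the blocks decomposition
lemma pvBlocks_cons_content (l : String) (ls : List String) (h : pvIsHeader l = false) :
    pvBlocks (l :: ls) = pvMapHead (fun b => pvClean [l] ++ b) (pvBlocks ls) := by
  rcases hf : ls.findIdx? pvIsHeader with _ | i
  · have h1 : (l :: ls).findIdx? pvIsHeader = none := by
      rw [List.findIdx?_cons, if_neg (by simp [h]), hf]; rfl
    rw [pvBlocks_eq_none _ h1, pvBlocks_eq_none _ hf, pvClean_cons]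
    rfl
  · have h1 : (l :: ls).findIdx? pvIsHeader = some (i + 1) := by
      rw [List.findIdx?_cons, if_neg (by simp [h]), hf]; rfl
    rw [pvBlocks_eq_some _ _ h1, pvBlocks_eq_some _ _ hf]
    simp only [List.take_succ_cons, List.drop_succ_cons, pvClean_cons l (List.take i ls), pvMapHead]

-- a header line starts a fresh block
lemma pvBlocks_cons_header (l : String) (ls : List String) (h : pvIsHeader l = true) :
    pvBlocks (l :: ls) = [] :: pvBlocks ls := by
  have h1 : (l :: ls).findIdx? pvIsHeader = some 0 := by
    rw [List.findIdx?_cons, if_pos h]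
  rw [pvBlocks_eq_some _ _ h1]
  simp [pvClean]

-- main invariant: A's fold + finalisation = filtering B's blocks, with the pending
-- block cur prepended to the first block
lemma pvKey (ls : List String) :
    ∀ (res : List (List String)) (cur : List String),
    pvFin (ls.foldl pvStepA (res, cur)) =
      res ++ (pvMapHead (fun b => cur ++ b) (pvBlocks ls)).filter (fun b => b ≠ []) := by
  induction ls with
  | nil =>
    intro res cur
    rw [pvBlocks]
    simp only [List.findIdx?_nil, List.foldl_nil, pvFin, pvClean, List.filter_nil,
      List.map_nil, pvMapHead, List.append_nil]
    split_ifs with h <;> simp_all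
  | cons l ls ih =>
    intro res cur
    by_cases hh : pvIsHeader l = true
    · -- header: A flushes cur; B starts a fresh block
      have he : l ≠ "" := by
        intro h; subst h; exact absurd hh (by decide)
      have hlen : (PySem.Str.len l == 0) = false := by
        rcases h : (PySem.Str.len l == 0) with _ | _
        · rfl
        · exact absurd ((pvLen_eq_zero_iff l).mp h) he
      have hA : pvStepA (res, cur) l = (if cur ≠ [] then (res ++ [cur], []) else (res, [])) := by
        simp only [pvStepA, hlen, Bool.false_eq_true, if_false]
        rw [show (PySem.Str.startswith l "@@" && decide (1 < PySem.Str.count l "@@")) = true from hh]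
        simp
      rw [List.foldl_cons, hA, pvBlocks_cons_header l ls hh]
      have hne : pvMapHead (fun b => cur ++ b) ([] :: pvBlocks ls)
          = cur :: pvBlocks ls := by simp [pvMapHead]
      rw [hne]
      split_ifs with hc
      · rw [ih (res ++ [cur]) []]
        simp [pvMapHead_id, hc]
      · rw [ih res []]
        simp only [ne_eq, not_not] at hc
        simp [pvMapHead_id, hc]
    · -- not a header: A appends the cleaned line (or skips the empty line);
      -- either way new cur = cur ++ pvClean [l]
      have hh' : pvIsHeader l = false := by simpa using hh
      have hA : pvStepA (res, cur) l = (res, cur ++ pvClean [l]) := by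
        by_cases he : l = ""
        · subst he; simp [pvStepA, pvClean]
        · have hlen : (PySem.Str.len l == 0) = false := by
            rcases h : (PySem.Str.len l == 0) with _ | _
            · rfl
            · exact absurd ((pvLen_eq_zero_iff l).mp h) he
          simp only [pvStepA, hlen, Bool.false_eq_true, if_false]
          rw [if_neg (by rw [show (PySem.Str.startswith l "@@" && decide (1 < PySem.Str.count l "@@")) = false from hh']; simp)]
          rw [pvClean1_eq l he]
          simp [pvClean, he]
      rw [List.foldl_cons, hA, pvBlocks_cons_content l ls hh',
        pvMapHead_comp, ih res (cur ++ pvClean [l])]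
      simp [List.append_assoc]

-- ===== VERDICT (by name: the statement is the Claim_ definition above) =====
theorem full_parse_diffs_split_spec : Claim_equal_full_parse_diffs_split := by
  intro diff _
  unfold Spec_full_parse_diffs_split full_parse_diffs_split full_parse_diffs_split_alt
  have h := pvKey ((PySem.Str.split? diff "\n").getD []) [] []
  simpa [pvFin, pvMapHead_id] using h
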